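-- pv_equiv track=rewrite | github.com/FranxYao/Gumbel-CRF | src/template_manager.py | _analyse_temp
-- ===== SOURCE A (Python) =====
-- def _next_ngram(temp, sent, idx, n, slen):
--   """Get the next ngram from a template-sentence pair"""
--   if(idx == slen): return None, None, None
--   ti = temp[idx]
--   t = [ti]
--   n_ = 1
--   for i in range(idx + 1, slen):
--     if(temp[i] != ti):
--       n_ += 1
--       if(n_ == 2): idx_ = i
--       ti = temp[i]
--       t.append(ti)
--     if(n_ == n + 1): break
--   if(n_ == n + 1):
--     t = t[: -1]
--     t = [str(ti) for ti in t]
--     s = sent[idx: i]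
--     s = [str(si) for si in s]
--     return idx_, '-'.join(t), '-'.join(s)
--   elif(n_ == n):
--     if(n == 1): idx_ = slen
--     t = [str(ti) for ti in t]
--     s = sent[idx: slen]
--     s = [str(si) for si in s]
--     return idx_, '-'.join(t), '-'.join(s)
--   else:
--     return None, None, None
--
-- def _analyse_temp(temp, sent, slen):
--   """Analysis a template-sentence pair"""
--   out_dict = {1: {}, 2: {}, 3: {}, 4: {}}
--   for n in range(1, 5):
--     idx = 0
--     idx, t, w = _next_ngram(temp, sent, idx, n, slen)
--     while(t != None):
--       if(t not in out_dict[n]): out_dict[n][t] = [w]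
--       else: out_dict[n][t].append(w)
--       idx, t, w = _next_ngram(temp, sent, idx, n, slen)
--   return out_dict
-- ===== SOURCE B (Python) =====
-- def _analyse_temp(temp, sent, slen):
--   """Analysis a template-sentence pair (run-length based rewrite)."""
--   # run-length segmentation of temp[:slen]: seed with the first element, then scan the rest
--   starts = []
--   vals = []
--   if slen != 0:
--     starts.append(0)
--     vals.append(temp[0])
--     prev = temp[0]
--     for i in range(1, slen):
--       if temp[i] != prev:
--         starts.append(i)
--         vals.append(temp[i])
--       prev = temp[i]
--   starts.append(slen)  # sentinel: end of the last run
--   k = len(vals)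
--   out_dict = {1: {}, 2: {}, 3: {}, 4: {}}
--   for n in range(1, 5):
--     d = out_dict[n]
--     for j in range(k - n + 1):
--       t = '-'.join(str(v) for v in vals[j:j + n])
--       s = '-'.join(str(x) for x in sent[starts[j]:starts[j + n]])
--       d.setdefault(t, []).append(s)
--   return out_dict
-- ===== Notes on version B (the rewrite author's own statement) =====
-- stated objective: alternative
-- what changed: A extracts each n-gram by re-walking the template from the current position via _next_ngram (re-reading every window, about n-fold re-scanning per pass); B computes the run-length segmentation of temp[:slen] once (seeded with temp[0], then one scan) and then emits each length-n window of consecutive runs in one sweep per n, with no re-scanning (measured ~1.3x faster, below the 1.5x bar, so no speed is claimed).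
import Mathlib
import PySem

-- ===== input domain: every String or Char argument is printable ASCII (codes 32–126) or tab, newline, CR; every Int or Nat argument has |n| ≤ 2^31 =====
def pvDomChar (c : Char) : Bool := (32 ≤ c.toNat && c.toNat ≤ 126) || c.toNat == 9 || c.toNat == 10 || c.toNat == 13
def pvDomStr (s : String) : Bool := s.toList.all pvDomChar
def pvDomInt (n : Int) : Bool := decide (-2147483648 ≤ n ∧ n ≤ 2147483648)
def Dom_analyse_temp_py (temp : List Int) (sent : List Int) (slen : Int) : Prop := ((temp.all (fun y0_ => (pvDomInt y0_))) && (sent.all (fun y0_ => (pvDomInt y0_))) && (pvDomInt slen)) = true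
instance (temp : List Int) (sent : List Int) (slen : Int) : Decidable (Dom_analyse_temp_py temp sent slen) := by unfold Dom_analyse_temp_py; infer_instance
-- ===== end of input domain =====

-- B replaces A's repeated rescans (_next_ngram re-walks the template from each position) by one
-- run-length pass followed by sliding windows of n runs; equivalence of the RETURN value is proved on Pre_.

-- ===== PORT A =====

-- loop state of the 'for i in range(idx+1, slen)' loop in _next_ngram
-- (done = the loop has hit 'break'; ib = the value of i at the break, used for sent[idx:i])
structure PVSt where
  done : Bool
  ti : Int
  t : List Int
  n_ : Int
  idx_ : Int
  ib : Int
  deriving Repr, DecidableEq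

def pvStep (temp : List Int) (n : Int) (st : PVSt) (i : Int) : PVSt :=
  if st.done then st
  else
    let c := PySem.List.pyGetD temp i 0
    let st1 :=
      if c ≠ st.ti then
        { st with ti := c, t := st.t ++ [c], n_ := st.n_ + 1,
                  idx_ := if st.n_ + 1 = 2 then i else st.idx_ }
      else st
    if st1.n_ = n + 1 then { st1 with done := true, ib := i } else st1

-- _next_ngram(temp, sent, idx, n, slen)  (idx_ is initialised to 0; Python never reads it before
-- first assigning it on the calls _analyse_temp makes, n ≥ 1)
def pvNextNgram (temp : List Int) (sent : List Int) (idx : Int) (n : Int) (slen : Int) :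
    Option Int × Option String × Option String :=
  if idx = slen then (none, none, none)
  else
    let ti := PySem.List.pyGetD temp idx 0
    let st := (PySem.List.pyRange (idx + 1) slen 1).foldl (pvStep temp n)
      { done := false, ti := ti, t := [ti], n_ := 1, idx_ := 0, ib := 0 }
    if st.n_ = n + 1 then
      (some st.idx_,
       some (PySem.Str.join "-" (st.t.dropLast.map PySem.Int.toStr)),
       some (PySem.Str.join "-" ((PySem.List.slice sent (some idx) (some st.ib)).map PySem.Int.toStr)))
    else if st.n_ = n then
      (some (if n = 1 then slen else st.idx_),
       some (PySem.Str.join "-" (st.t.map PySem.Int.toStr)),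
       some (PySem.Str.join "-" ((PySem.List.slice sent (some idx) (some slen)).map PySem.Int.toStr)))
    else (none, none, none)

-- the 'while(t != None)' loop of _analyse_temp; idx strictly increases towards slen on every
-- iteration (proved via the equivalence), so slen.toNat + 1 iterations always suffice
def pvLoopA (temp : List Int) (sent : List Int) (n : Int) (slen : Int) :
    Nat → Int → PySem.Dict String (List String) → PySem.Dict String (List String)
  | 0, _, d => d
  | fuel + 1, idx, d =>
    match pvNextNgram temp sent idx n slen with
    | (some idx', some t, some w) =>
        pvLoopA temp sent n slen fuel idx'
          (if d.contains t = false then d.insert t [w] else d.modify t [] (· ++ [w]))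
    | _ => d

def analyse_temp_py (temp : List Int) (sent : List Int) (slen : Int) :
    List (Int × List (String × List String)) :=
  let out0 : PySem.Dict Int (PySem.Dict String (List String)) :=
    ((((PySem.Dict.empty).insert 1 PySem.Dict.empty).insert 2 PySem.Dict.empty).insert 3
        PySem.Dict.empty).insert 4 PySem.Dict.empty
  let out := (PySem.List.pyRange 1 5 1).foldl
    (fun od n => od.insert n (pvLoopA temp sent n slen (slen.toNat + 1) 0 (od.getD n PySem.Dict.empty)))
    out0
  out.items.map (fun p => (p.1, p.2.items))

-- ===== PORT B =====

-- one pass over temp[:slen]: start index of each run, value of each run, prev element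
-- (seeded with temp[0] when slen != 0, then scanning i in range(1, slen))
def pvStepR (temp : List Int) (st : List Int × List Int × Option Int) (i : Int) :
    List Int × List Int × Option Int :=
  let c := PySem.List.pyGetD temp i 0
  if some c ≠ st.2.2 then (st.1 ++ [i], st.2.1 ++ [c], some c)
  else (st.1, st.2.1, some c)

def pvRunLen (temp : List Int) (slen : Int) : List Int × List Int × Option Int :=
  if slen ≠ 0 then
    (PySem.List.pyRange 1 slen 1).foldl (pvStepR temp)
      ([0], [PySem.List.pyGetD temp 0 0], some (PySem.List.pyGetD temp 0 0))
  else ([], [], none)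

-- body of B's inner loop over window index j (starts carries the sentinel slen at the end)
def pvStepB (sent : List Int) (starts : List Int) (vals : List Int) (n : Int)
    (d : PySem.Dict String (List String)) (j : Int) : PySem.Dict String (List String) :=
  let t := PySem.Str.join "-" ((PySem.List.slice vals (some j) (some (j + n))).map PySem.Int.toStr)
  let s := PySem.Str.join "-"
    ((PySem.List.slice sent (some (PySem.List.pyGetD starts j 0))
        (some (PySem.List.pyGetD starts (j + n) 0))).map PySem.Int.toStr)
  d.modify t [] (· ++ [s])

def pvInnerB (sent : List Int) (starts : List Int) (vals : List Int) (n : Int)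
    (d : PySem.Dict String (List String)) : PySem.Dict String (List String) :=
  (PySem.List.pyRange 0 ((vals.length : Int) - n + 1) 1).foldl (pvStepB sent starts vals n) d

def analyse_temp_py_alt (temp : List Int) (sent : List Int) (slen : Int) :
    List (Int × List (String × List String)) :=
  let r := pvRunLen temp slen
  let starts := r.1 ++ [slen]
  let vals := r.2.1
  let out0 : PySem.Dict Int (PySem.Dict String (List String)) :=
    ((((PySem.Dict.empty).insert 1 PySem.Dict.empty).insert 2 PySem.Dict.empty).insert 3
        PySem.Dict.empty).insert 4 PySem.Dict.empty
  let out := (PySem.List.pyRange 1 5 1).foldl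
    (fun od n => od.insert n (pvInnerB sent starts vals n (od.getD n PySem.Dict.empty)))
    out0
  out.items.map (fun p => (p.1, p.2.items))

-- ===== PRECONDITION & SPEC =====
-- Pre_ excludes exactly the inputs on which A raises IndexError: slen > len(temp), and
-- slen ≠ 0 with temp = [] (the first template read temp[0] fails; for slen ≤ len(temp) and
-- temp ≠ [] A returns normally, also when slen < 0).
def Pre_analyse_temp_py (temp : List Int) (sent : List Int) (slen : Int) : Prop :=
  slen ≤ (temp.length : Int) ∧ (0 ≤ slen ∨ temp ≠ [])
instance (temp : List Int) (sent : List Int) (slen : Int) :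
    Decidable (Pre_analyse_temp_py temp sent slen) := by unfold Pre_analyse_temp_py; infer_instance

def pvWitness_analyse_temp_py : List Int × List Int × Int := ([1, 1, 2, 3], [7, 8, 9, 10], 4)

def Spec_analyse_temp_py (temp : List Int) (sent : List Int) (slen : Int)
    (out : List (Int × List (String × List String))) : Prop :=
  out = analyse_temp_py_alt temp sent slen
instance (temp : List Int) (sent : List Int) (slen : Int)
    (out : List (Int × List (String × List String))) :
    Decidable (Spec_analyse_temp_py temp sent slen out) := by
  unfold Spec_analyse_temp_py; infer_instance

-- ===== CLAIM (what is proved, stated in full; the proofs are below) =====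
def Claim_equal_analyse_temp_py : Prop :=
  ∀ (temp : List Int) (sent : List Int) (slen : Int), Dom_analyse_temp_py temp sent slen →
    Pre_analyse_temp_py temp sent slen →
    Spec_analyse_temp_py temp sent slen (analyse_temp_py temp sent slen)

-- ===== LEMMAS AND PROOFS =====

-- run-length decomposition of temp[:slen]: starts carries the sentinel slen as last entry
def pvGood (temp : List Int) (slen : Int) (starts : List Int) (vals : List Int) : Prop :=
  starts.length = vals.length + 1 ∧
  (∀ j : Nat, j + 1 < starts.length → starts.getD j 0 < starts.getD (j + 1) 0) ∧
  (0 < vals.length → starts.getD 0 0 = 0) ∧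
  starts.getD vals.length 0 = slen ∧
  (∀ j : Nat, j < vals.length → ∀ i : Int, starts.getD j 0 ≤ i → i < starts.getD (j + 1) 0 →
    PySem.List.pyGetD temp i 0 = vals.getD j 0) ∧
  (∀ j : Nat, j + 1 < vals.length → vals.getD (j + 1) 0 ≠ vals.getD j 0) ∧
  (vals.length = 0 → slen = 0)

lemma pvGood_mono (temp : List Int) (slen : Int) (starts vals : List Int)
    (hG : pvGood temp slen starts vals) :
    ∀ a b : Nat, a < b → b < starts.length → starts.getD a 0 < starts.getD b 0 := by
  intro a b
  induction b with
  | zero => omega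
  | succ b ih =>
    intro hab hb
    rcases Nat.lt_succ_iff_lt_or_eq.mp hab with h | h
    · exact lt_trans (ih h (by omega)) (hG.2.1 b hb)
    · subst h; exact hG.2.1 a hb

lemma pvGood_le (temp : List Int) (slen : Int) (starts vals : List Int)
    (hG : pvGood temp slen starts vals) :
    ∀ j : Nat, j < starts.length → (j : Int) ≤ starts.getD j 0 := by
  intro j
  induction j with
  | zero =>
    intro hj
    rcases Nat.eq_zero_or_pos vals.length with h | h
    · have hs : starts.getD 0 0 = slen := by
        have := hG.2.2.2.1; rwa [h] at this
      have := hG.2.2.2.2.2.2 h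
      omega
    · rw [hG.2.2.1 h]; rfl
  | succ j ih =>
    intro hj
    have h1 := ih (by omega)
    have h2 := hG.2.1 j hj
    push_cast
    omega

-- one evaluation step of the ported inner loop on a not-yet-broken state
lemma pvStep_eval (temp : List Int) (n : Int) (ti : Int) (t : List Int) (n_ idx_ ib i : Int) :
    pvStep temp n ⟨false, ti, t, n_, idx_, ib⟩ i =
    (if PySem.List.pyGetD temp i 0 ≠ ti then
      (if n_ + 1 = n + 1 then
        ⟨true, PySem.List.pyGetD temp i 0, t ++ [PySem.List.pyGetD temp i 0], n_ + 1,
          (if n_ + 1 = 2 then i else idx_), i⟩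
       else
        ⟨false, PySem.List.pyGetD temp i 0, t ++ [PySem.List.pyGetD temp i 0], n_ + 1,
          (if n_ + 1 = 2 then i else idx_), ib⟩)
     else (if n_ = n + 1 then ⟨true, ti, t, n_, idx_, i⟩ else ⟨false, ti, t, n_, idx_, ib⟩)) := by
  simp only [pvStep]
  split_ifs <;> simp_all

-- a fold segment on which temp is constant and equal to st.ti does nothing
lemma pvRunConst (temp : List Int) (n : Int) (st : PVSt) (h1 : st.done = false)
    (h2 : st.n_ ≠ n + 1) (l : List Int)
    (hc : ∀ i ∈ l, PySem.List.pyGetD temp i 0 = st.ti) :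
    l.foldl (pvStep temp n) st = st := by
  induction l with
  | nil => rfl
  | cons a l ih =>
    have ha := hc a (by simp)
    simp only [List.foldl_cons]
    rw [show pvStep temp n st a = st by simp [pvStep, h1, ha, h2]]
    exact ih (fun i hi => hc i (by simp [hi]))

lemma pvDoneConst (temp : List Int) (n : Int) (st : PVSt) (h1 : st.done = true) (l : List Int) :
    l.foldl (pvStep temp n) st = st := by
  induction l with
  | nil => rfl
  | cons a l ih =>
    simp only [List.foldl_cons]
    rw [show pvStep temp n st a = st by simp [pvStep, h1]]
    exact ih

lemma pvTakeSucc (vals : List Int) (j s : Nat) (h : j + s < vals.length) :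
    (vals.drop j).take (s + 1) = (vals.drop j).take s ++ [vals.getD (j + s) 0] := by
  rw [List.take_add_one]
  congr 1
  rw [List.getElem?_drop]
  simp [List.getElem?_eq_getElem h]

-- inner-loop invariant: scanning from the end of run m onwards
lemma pvL (temp sent starts vals : List Int) (slen : Int)
    (hG : pvGood temp slen starts vals) (n : Int) (hn : 1 ≤ n) :
    ∀ (r : Nat) (j m : Nat) (ix0 ib0 : Int), j ≤ m → m < vals.length → vals.length - m = r →
    ((m - j : Nat) : Int) + 1 ≤ n →
    (PySem.List.pyRange (starts.getD m 0 + 1) slen 1).foldl (pvStep temp n)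
      { done := false, ti := vals.getD m 0, t := (vals.drop j).take (m - j + 1),
        n_ := ((m - j : Nat) : Int) + 1,
        idx_ := if j < m then starts.getD (j + 1) 0 else ix0, ib := ib0 } =
    (if (j : Int) + n < (vals.length : Int) then
      { done := true, ti := vals.getD (j + n.toNat) 0, t := (vals.drop j).take (n.toNat + 1),
        n_ := n + 1, idx_ := starts.getD (j + 1) 0, ib := starts.getD (j + n.toNat) 0 }
     else
      { done := false, ti := vals.getD (vals.length - 1) 0, t := vals.drop j,
        n_ := ((vals.length - j : Nat) : Int),
        idx_ := if j + 1 < vals.length then starts.getD (j + 1) 0 else ix0, ib := ib0 }) := by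
  have hlen : starts.length = vals.length + 1 := hG.1
  have hSlen : starts.getD vals.length 0 = slen := hG.2.2.2.1
  intro r
  induction r with
  | zero => intro j m ix0 ib0 hjm hm hr hcnt; omega
  | succ r ih =>
    intro j m ix0 ib0 hjm hm hr hcnt
    have h_inc : starts.getD m 0 < starts.getD (m + 1) 0 := hG.2.1 m (by omega)
    have h_m1_le : starts.getD (m + 1) 0 ≤ slen := by
      rcases Nat.lt_or_ge (m + 1) vals.length with h | h
      · have := pvGood_mono temp slen starts vals hG (m + 1) vals.length h (by omega)
        omega
      · have : m + 1 = vals.length := by omega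
        rw [this, hSlen]
    rw [PySem.List.pyRange_one_append (starts.getD m 0 + 1) (starts.getD (m + 1) 0) slen
          (by omega) h_m1_le, List.foldl_append]
    rw [pvRunConst temp n
          { done := false, ti := vals.getD m 0, t := (vals.drop j).take (m - j + 1),
            n_ := ((m - j : Nat) : Int) + 1,
            idx_ := if j < m then starts.getD (j + 1) 0 else ix0, ib := ib0 }
          rfl (show ((m - j : Nat) : Int) + 1 ≠ n + 1 by omega)
          (PySem.List.pyRange (starts.getD m 0 + 1) (starts.getD (m + 1) 0) 1)
          (by
            intro i hi
            rw [PySem.List.mem_pyRange_one] at hi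
            exact hG.2.2.2.2.1 m (by omega) i (by omega) (by omega))]
    by_cases hend : m + 1 = vals.length
    · have hcond : ¬ ((j : Int) + n < (vals.length : Int)) := by omega
      rw [show starts.getD (m + 1) 0 = slen by rw [hend, hSlen],
          PySem.List.pyRange_one_eq_nil (le_refl slen), List.foldl_nil,
          if_neg hcond]
      simp only [PVSt.mk.injEq]
      and_intros <;>
        first
        | rfl
        | trivial
        | omega
        | (rw [show vals.length - 1 = m by omega])
        | (apply List.take_of_length_le; simp [List.length_drop]; omega)
    · have h_m1_lt : starts.getD (m + 1) 0 < slen := by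
        have := pvGood_mono temp slen starts vals hG (m + 1) vals.length (by omega) (by omega)
        omega
      rw [PySem.List.pyRange_one_cons h_m1_lt, List.foldl_cons]
      have hc2 : PySem.List.pyGetD temp (starts.getD (m + 1) 0) 0 = vals.getD (m + 1) 0 :=
        hG.2.2.2.2.1 (m + 1) (by omega) _ (le_refl _) (hG.2.1 (m + 1) (by omega))
      have hne : vals.getD (m + 1) 0 ≠ vals.getD m 0 := hG.2.2.2.2.2.1 m (by omega)
      have hidx : (if ((m - j : Nat) : Int) + 1 + 1 = 2 then starts.getD (m + 1) 0
            else if j < m then starts.getD (j + 1) 0 else ix0) = starts.getD (j + 1) 0 := by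
        by_cases hjme : j = m
        · subst hjme; simp
        · rw [if_neg (by omega), if_pos (by omega)]
      by_cases hbr : ((m - j : Nat) : Int) + 1 + 1 = n + 1
      · rw [pvStep_eval, hc2, if_pos hne, hidx, if_pos hbr,
            pvDoneConst temp n _ rfl,
            if_pos (show (j : Int) + n < (vals.length : Int) by omega)]
        have hnt : n.toNat = m + 1 - j := by omega
        simp only [PVSt.mk.injEq]
        and_intros <;>
          first
          | rfl
          | trivial
          | omega
          | (rw [show j + n.toNat = m + 1 by omega])
          | (rw [hnt, pvTakeSucc vals j (m + 1 - j) (by omega),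
                 show j + (m + 1 - j) = m + 1 by omega, show m - j + 1 = m + 1 - j by omega])
      · rw [pvStep_eval, hc2, if_pos hne, hidx, if_neg hbr]
        have hres := ih j (m + 1) ix0 ib0 (by omega) (by omega) (by omega) (by omega)
        rw [show (if j < m + 1 then starts.getD (j + 1) 0 else ix0) = starts.getD (j + 1) 0
              from if_pos (by omega)] at hres
        rw [show (vals.drop j).take (m + 1 - j + 1) =
              (vals.drop j).take (m - j + 1) ++ [vals.getD (m + 1) 0] from by
              rw [pvTakeSucc vals j (m + 1 - j) (by omega),
                  show j + (m + 1 - j) = m + 1 by omega,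
                  show m - j + 1 = m + 1 - j by omega]] at hres
        rw [show ((m + 1 - j : Nat) : Int) + 1 = ((m - j : Nat) : Int) + 1 + 1 by omega] at hres
        exact hres

-- _next_ngram characterised on run boundaries
lemma pvNG (temp sent starts vals : List Int) (slen : Int)
    (hG : pvGood temp slen starts vals) (n : Int) (hn : 1 ≤ n)
    (j : Nat) (hj : j ≤ vals.length) :
    pvNextNgram temp sent (starts.getD j 0) n slen =
    (if (j : Int) + n ≤ (vals.length : Int) then
      (some (starts.getD (j + 1) 0),
       some (PySem.Str.join "-" (((vals.drop j).take n.toNat).map PySem.Int.toStr)),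
       some (PySem.Str.join "-" ((PySem.List.slice sent (some (starts.getD j 0))
          (some (starts.getD (j + n.toNat) 0))).map PySem.Int.toStr)))
     else (none, none, none)) := by
  have hlen : starts.length = vals.length + 1 := hG.1
  have hSlen : starts.getD vals.length 0 = slen := hG.2.2.2.1
  rcases Nat.lt_or_ge j vals.length with hjlt | hge
  · have hne_slen : starts.getD j 0 ≠ slen := by
      have := pvGood_mono temp slen starts vals hG j vals.length hjlt (by omega)
      omega
    have hti : PySem.List.pyGetD temp (starts.getD j 0) 0 = vals.getD j 0 :=
      hG.2.2.2.2.1 j hjlt _ (le_refl _) (hG.2.1 j (by omega))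
    have hinit : ({ done := false, ti := vals.getD j 0, t := [vals.getD j 0], n_ := 1, idx_ := 0, ib := 0 } : PVSt) = { done := false, ti := vals.getD j 0, t := (vals.drop j).take (j - j + 1), n_ := ((j - j : Nat) : Int) + 1, idx_ := if j < j then starts.getD (j + 1) 0 else 0, ib := 0 } := by
      simp only [PVSt.mk.injEq, Nat.sub_self]
      and_intros <;> first | trivial | (rw [pvTakeSucc vals j 0 (by omega)]; simp) | simp
    simp only [pvNextNgram]
    rw [if_neg hne_slen, hti, hinit,
        pvL temp sent starts vals slen hG n hn (vals.length - j) j j 0 0 (le_refl j) hjlt rfl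
          (by omega)]
    by_cases hlt : (j : Int) + n < (vals.length : Int)
    · rw [if_pos hlt, if_pos (show (j : Int) + n ≤ (vals.length : Int) by omega)]
      have hdl : ((vals.drop j).take (n.toNat + 1)).dropLast = (vals.drop j).take n.toNat := by
        rw [pvTakeSucc vals j n.toNat (by omega)]
        exact List.dropLast_concat
      show (if (n + 1 : Int) = n + 1 then _ else _) = _
      rw [if_pos rfl, hdl]
    · rw [if_neg hlt]
      by_cases heq : (j : Int) + n = (vals.length : Int)
      · rw [if_pos (show (j : Int) + n ≤ (vals.length : Int) by omega)]
        show (if ((vals.length - j : Nat) : Int) = n + 1 then _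
              else if ((vals.length - j : Nat) : Int) = n then _ else _) = _
        rw [if_neg (show ((vals.length - j : Nat) : Int) ≠ n + 1 by omega),
            if_pos (show ((vals.length - j : Nat) : Int) = n by omega)]
        have htk : (vals.drop j).take n.toNat = vals.drop j :=
          List.take_of_length_le (by simp [List.length_drop]; omega)
        have hjn : j + n.toNat = vals.length := by omega
        rw [htk, hjn, hSlen]
        by_cases hn1 : n = 1
        · rw [if_pos hn1, show j + 1 = vals.length by omega, hSlen]
        · rw [if_neg hn1, if_pos (show j + 1 < vals.length by omega)]
      · rw [if_neg (show ¬ ((j : Int) + n ≤ (vals.length : Int)) by omega)]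
        show (if ((vals.length - j : Nat) : Int) = n + 1 then _
              else if ((vals.length - j : Nat) : Int) = n then _ else _) = _
        rw [if_neg (show ((vals.length - j : Nat) : Int) ≠ n + 1 by omega),
            if_neg (show ((vals.length - j : Nat) : Int) ≠ n by omega)]
  · have hj' : j = vals.length := by omega
    subst hj'
    simp only [pvNextNgram]
    rw [hSlen, if_pos rfl,
        if_neg (show ¬ ((vals.length : Int) + n ≤ (vals.length : Int)) by omega)]

lemma pvStepDict (d : PySem.Dict String (List String)) (t w : String) :
    (if d.contains t = false then d.insert t [w] else d.modify t [] (· ++ [w])) =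
      d.modify t [] (· ++ [w]) := by
  by_cases h : d.contains t = false
  · simp [h, PySem.Dict.modify, PySem.Dict.getD_of_not_contains (h := h)]
  · simp [h]

lemma pvLOOP (temp sent starts vals : List Int) (slen : Int)
    (hG : pvGood temp slen starts vals) (n : Int) (hn : 1 ≤ n) :
    ∀ (fuel : Nat) (j : Nat) (d : PySem.Dict String (List String)), j ≤ vals.length →
      vals.length - j < fuel →
      pvLoopA temp sent n slen fuel (starts.getD j 0) d =
        (PySem.List.pyRange (j : Int) ((vals.length : Int) - n + 1) 1).foldl
          (pvStepB sent starts vals n) d := by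
  intro fuel
  induction fuel with
  | zero => intro j d hj hf; omega
  | succ fuel ih =>
    intro j d hj hf
    simp only [pvLoopA]
    rw [pvNG temp sent starts vals slen hG n hn j hj]
    by_cases hc : (j : Int) + n ≤ (vals.length : Int)
    · rw [if_pos hc]
      show pvLoopA temp sent n slen fuel (starts.getD (j + 1) 0)
          (if d.contains (PySem.Str.join "-" (((vals.drop j).take n.toNat).map PySem.Int.toStr)) = false
           then d.insert (PySem.Str.join "-" (((vals.drop j).take n.toNat).map PySem.Int.toStr))
                  [PySem.Str.join "-" ((PySem.List.slice sent (some (starts.getD j 0))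
                      (some (starts.getD (j + n.toNat) 0))).map PySem.Int.toStr)]
           else d.modify (PySem.Str.join "-" (((vals.drop j).take n.toNat).map PySem.Int.toStr)) []
                  (· ++ [PySem.Str.join "-" ((PySem.List.slice sent (some (starts.getD j 0))
                      (some (starts.getD (j + n.toNat) 0))).map PySem.Int.toStr)])) =
        (PySem.List.pyRange (j : Int) ((vals.length : Int) - n + 1) 1).foldl
          (pvStepB sent starts vals n) d
      rw [pvStepDict]
      have hsl : PySem.List.slice vals (some (j : Int)) (some ((j : Int) + n)) =
          (vals.drop j).take n.toNat := by
        rw [PySem.List.slice_toNat vals (a := (j : Int)) (b := (j : Int) + n) (by omega) (by omega),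
            show ((j : Int) + n).toNat = j + n.toNat by omega, Int.toNat_natCast,
            show j + n.toNat - j = n.toNat by omega]
      have hg1 : PySem.List.pyGetD starts (j : Int) 0 = starts.getD j 0 := by
        rw [PySem.List.pyGetD_natCast]
      have hg2 : PySem.List.pyGetD starts ((j : Int) + n) 0 = starts.getD (j + n.toNat) 0 := by
        rw [show (j : Int) + n = ((j + n.toNat : Nat) : Int) by omega, PySem.List.pyGetD_natCast]
      rw [PySem.List.pyRange_one_cons (show (j : Int) < (vals.length : Int) - n + 1 by omega),
          List.foldl_cons]
      rw [show pvStepB sent starts vals n d (j : Int) =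
            d.modify (PySem.Str.join "-" (((vals.drop j).take n.toNat).map PySem.Int.toStr)) []
              (· ++ [PySem.Str.join "-" ((PySem.List.slice sent (some (starts.getD j 0))
                  (some (starts.getD (j + n.toNat) 0))).map PySem.Int.toStr)]) from by
            simp only [pvStepB, hsl, hg1, hg2]]
      rw [show (j : Int) + 1 = ((j + 1 : Nat) : Int) by push_cast; ring]
      exact ih (j + 1) _ (by omega) (by omega)
    · rw [if_neg hc, PySem.List.pyRange_one_eq_nil (by omega), List.foldl_nil]

lemma pvR (temp : List Int) : ∀ (m : Nat), m ≤ temp.length →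
    pvGood temp (m : Int) ((pvRunLen temp (m : Int)).1 ++ [(m : Int)]) (pvRunLen temp (m : Int)).2.1
    ∧ (pvRunLen temp (m : Int)).2.2 =
        (if m = 0 then none else some (PySem.List.pyGetD temp ((m : Int) - 1) 0)) := by
  intro m
  induction m with
  | zero =>
    intro _
    have h00 : pvRunLen temp ((0 : Nat) : Int) = ([], [], none) := rfl
    rw [h00]
    refine ⟨⟨by simp, ?_, ?_, by simp, ?_, ?_, by simp⟩, by simp⟩
    · intro j hj; simp at hj
    · intro hj; simp at hj
    · intro j hj; simp at hj
    · intro j hj; simp at hj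
  | succ m ih =>
    intro hlen1
    obtain ⟨hGm, hp⟩ := ih (by omega)
    rcases h : pvRunLen temp (m : Int) with ⟨s, v, p⟩
    rw [h] at hGm hp
    simp only at hGm hp
    have hslen : s.length = v.length := by
      have := hGm.1; simp at this; omega
    by_cases hm0 : m = 0
    · subst hm0
      rw [show pvRunLen temp ((0 + 1 : Nat) : Int) =
            ([(0 : Int)], [PySem.List.pyGetD temp 0 0], some (PySem.List.pyGetD temp 0 0)) from by
          simp only [pvRunLen]
          rw [if_pos (by norm_num), show ((0 + 1 : Nat) : Int) = 1 by norm_num,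
              PySem.List.pyRange_one_eq_nil (le_refl 1), List.foldl_nil]]
      constructor
      · refine ⟨by simp, ?_, by intro _; simp, by simp, ?_, ?_, by simp⟩
        · intro j hj
          simp only [List.length_append, List.length_cons, List.length_nil] at hj
          have hj1 : j = 0 := by omega
          subst hj1; simp
        · intro j hj i h1 h2
          simp only [List.length_cons, List.length_nil] at hj
          have hj1 : j = 0 := by omega
          subst hj1
          simp only [List.nil_append, List.singleton_append, List.getD_cons_zero,
            List.getD_cons_succ] at h1 h2 ⊢
          push_cast at h2
          have hi : i = 0 := by omega
          subst hi; rfl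
        · intro j hj; simp at hj
      · simp
    · have hstep2 : pvRunLen temp ((m + 1 : Nat) : Int) = pvStepR temp (s, v, p) (m : Int) := by
        have hm' : pvRunLen temp (m : Int) =
            (PySem.List.pyRange 1 (m : Int) 1).foldl (pvStepR temp)
              ([0], [PySem.List.pyGetD temp 0 0], some (PySem.List.pyGetD temp 0 0)) := by
          simp only [pvRunLen]
          rw [if_pos (show (m : Int) ≠ 0 by exact_mod_cast Nat.cast_ne_zero.mpr hm0)]
        simp only [pvRunLen]
        rw [if_pos (show ((m + 1 : Nat) : Int) ≠ 0 by push_cast; omega),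
            show ((m + 1 : Nat) : Int) = (m : Int) + 1 by push_cast; ring,
            PySem.List.pyRange_one_succ_right (by exact_mod_cast Nat.one_le_iff_ne_zero.mpr hm0),
            List.foldl_append, List.foldl_cons, List.foldl_nil, ← hm', h]
      have hkk : 0 < v.length := by
        by_contra hkk0
        have := hGm.2.2.2.2.2.2 (by omega)
        omega
      have hpm : p = some (PySem.List.pyGetD temp ((m : Int) - 1) 0) := by
        rw [hp, if_neg hm0]
      have hO_s : ∀ jj, jj < s.length → (s ++ [(m : Int)]).getD jj 0 = s.getD jj 0 :=
        fun jj hh => List.getD_append _ _ _ _ hh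
      have hOlast : (s ++ [(m : Int)]).getD v.length 0 = (m : Int) := by
        rw [← hslen, List.getD_append_right _ _ _ _ (le_refl _)]; simp
      have hlast : PySem.List.pyGetD temp ((m : Int) - 1) 0 = v.getD (v.length - 1) 0 := by
        apply hGm.2.2.2.2.1 (v.length - 1) (by omega)
        · have hb := hGm.2.1 (v.length - 1) (by simp; omega)
          rw [show v.length - 1 + 1 = v.length by omega, hOlast] at hb
          omega
        · rw [show v.length - 1 + 1 = v.length by omega, hOlast]; omega
      by_cases hcond : some (PySem.List.pyGetD temp (m : Int) 0) ≠ p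
      · -- new run starting at m
        have hsv : pvStepR temp (s, v, p) (m : Int) =
            (s ++ [(m : Int)], v ++ [PySem.List.pyGetD temp (m : Int) 0],
             some (PySem.List.pyGetD temp (m : Int) 0)) := by
          simp only [pvStepR]
          rw [if_pos hcond]
        have hcne : PySem.List.pyGetD temp (m : Int) 0 ≠ v.getD (v.length - 1) 0 := by
          rw [hpm, hlast] at hcond
          intro he; exact hcond (by rw [he])
        rw [hstep2, hsv]
        dsimp only
        have hNO : ∀ jj, jj < s.length + 1 →
            ((s ++ [(m : Int)]) ++ [((m + 1 : Nat) : Int)]).getD jj 0 =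
              (s ++ [(m : Int)]).getD jj 0 := by
          intro jj hh
          exact List.getD_append _ _ _ _ (by simp; omega)
        have hNlast : ((s ++ [(m : Int)]) ++ [((m + 1 : Nat) : Int)]).getD (v.length + 1) 0 =
            ((m + 1 : Nat) : Int) := by
          rw [show v.length + 1 = (s ++ [(m : Int)]).length by simp; omega,
              List.getD_append_right _ _ _ _ (le_refl _)]
          simp
        have hV : ∀ jj, jj < v.length →
            (v ++ [PySem.List.pyGetD temp (m : Int) 0]).getD jj 0 = v.getD jj 0 :=
          fun jj hh => List.getD_append _ _ _ _ hh
        have hVlast : (v ++ [PySem.List.pyGetD temp (m : Int) 0]).getD v.length 0 =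
            PySem.List.pyGetD temp (m : Int) 0 := by
          rw [List.getD_append_right _ _ _ _ (le_refl _)]; simp
        constructor
        · refine ⟨by simp; omega, ?_, ?_, ?_, ?_, ?_, by intro hz; simp at hz⟩
          · -- strictly increasing
            intro j hj
            simp only [List.length_append, List.length_cons, List.length_nil] at hj
            rcases Nat.lt_or_ge (j + 1) (s.length + 1) with hlt | hge
            · rw [hNO j (by omega), hNO (j + 1) hlt]
              exact hGm.2.1 j (by simp; omega)
            · have hje : j = v.length := by omega
              subst hje
              rw [hNO v.length (by omega), hOlast, hNlast]
              push_cast; omega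
          · intro _
            rw [hNO 0 (by omega), hO_s 0 (by omega)]
            have := hGm.2.2.1 hkk
            rw [hO_s 0 (by omega)] at this
            exact this
          · rw [show (v ++ [PySem.List.pyGetD temp (m : Int) 0]).length = v.length + 1 by simp,
                hNlast]
          · intro j hj i h1 h2
            simp only [List.length_append, List.length_cons, List.length_nil] at hj
            rcases Nat.lt_or_ge j v.length with hlt | hge
            · rw [hNO j (by omega)] at h1
              rw [hNO (j + 1) (by omega)] at h2
              rw [hV j hlt]
              exact hGm.2.2.2.2.1 j hlt i h1 h2
            · have hje : j = v.length := by omega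
              subst hje
              rw [hNO v.length (by omega), hOlast] at h1
              rw [hNlast] at h2
              have hi : i = (m : Int) := by push_cast at h2; omega
              subst hi
              rw [hVlast]
          · intro j hj
            simp only [List.length_append, List.length_cons, List.length_nil] at hj
            rcases Nat.lt_or_ge (j + 1) v.length with hlt | hge
            · rw [hV (j + 1) hlt, hV j (by omega)]
              exact hGm.2.2.2.2.2.1 j hlt
            · have hje : j + 1 = v.length := by omega
              rw [hje, hVlast, hV j (by omega), show j = v.length - 1 by omega]
              exact hcne
        · rw [if_neg (by omega)]
          rw [show ((m + 1 : Nat) : Int) - 1 = (m : Int) by push_cast; ring]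
      · -- continuation of the last run
        have hsv : pvStepR temp (s, v, p) (m : Int) =
            (s, v, some (PySem.List.pyGetD temp (m : Int) 0)) := by
          simp only [pvStepR]
          rw [if_neg hcond]
        have hceq : PySem.List.pyGetD temp (m : Int) 0 = v.getD (v.length - 1) 0 := by
          rw [not_ne_iff, hpm] at hcond
          injection hcond with hh
          rw [hh, hlast]
        rw [hstep2, hsv]
        dsimp only
        have hN2_s : ∀ jj, jj < s.length →
            (s ++ [((m + 1 : Nat) : Int)]).getD jj 0 = s.getD jj 0 :=
          fun jj hh => List.getD_append _ _ _ _ hh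
        have hN2last : (s ++ [((m + 1 : Nat) : Int)]).getD v.length 0 = ((m + 1 : Nat) : Int) := by
          rw [← hslen, List.getD_append_right _ _ _ _ (le_refl _)]; simp
        constructor
        · refine ⟨by simp; omega, ?_, ?_, hN2last, ?_, ?_, by intro hz; omega⟩
          · intro j hj
            simp only [List.length_append, List.length_cons, List.length_nil] at hj
            rcases Nat.lt_or_ge (j + 1) s.length with hlt | hge
            · rw [hN2_s j (by omega), hN2_s (j + 1) hlt]
              have := hGm.2.1 j (by simp; omega)
              rw [hO_s j (by omega), hO_s (j + 1) (by omega)] at this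
              exact this
            · have hje : j + 1 = v.length := by omega
              have hb := hGm.2.1 j (by simp; omega)
              rw [hO_s j (by omega), show j + 1 = v.length from hje, hOlast] at hb
              rw [hN2_s j (by omega), hje, hN2last]
              push_cast; omega
          · intro _
            have := hGm.2.2.1 hkk
            rw [hO_s 0 (by omega)] at this
            rw [hN2_s 0 (by omega)]
            exact this
          · intro j hj i h1 h2
            rcases Nat.lt_or_ge (j + 1) v.length with hlt | hge
            · rw [hN2_s j (by omega)] at h1
              rw [hN2_s (j + 1) (by omega)] at h2
              have := hGm.2.2.2.2.1 j hj i ?_ ?_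
              · exact this
              · rw [hO_s j (by omega)]; exact h1
              · rw [hO_s (j + 1) (by omega)]; exact h2
            · have hje : j + 1 = v.length := by omega
              rw [hN2_s j (by omega)] at h1
              rw [hje, hN2last] at h2
              rcases lt_or_eq_of_le (show i ≤ (m : Int) by push_cast at h2; omega) with hi | hi
              · apply hGm.2.2.2.2.1 j hj i
                · rw [hO_s j (by omega)]; exact h1
                · rw [hje, hOlast]; exact hi
              · subst hi
                rw [hceq, show j = v.length - 1 by omega]
          · exact hGm.2.2.2.2.2.1
        · rw [if_neg (by omega)]
          rw [show ((m + 1 : Nat) : Int) - 1 = (m : Int) by push_cast; ring]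

lemma pvRunLen_neg (temp : List Int) (slen : Int) (hneg : slen < 0) :
    pvRunLen temp slen =
      ([0], [PySem.List.pyGetD temp 0 0], some (PySem.List.pyGetD temp 0 0)) := by
  simp only [pvRunLen]
  rw [if_pos (show slen ≠ 0 by omega), PySem.List.pyRange_one_eq_nil (by omega), List.foldl_nil]

lemma pvNegNG (temp sent : List Int) (slen n : Int) (hneg : slen < 0) (hn : 1 ≤ n) :
    pvNextNgram temp sent 0 n slen =
      (if n = 1 then
        (some slen,
         some (PySem.Str.join "-" ([PySem.List.pyGetD temp 0 0].map PySem.Int.toStr)),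
         some (PySem.Str.join "-"
           ((PySem.List.slice sent (some 0) (some slen)).map PySem.Int.toStr)))
       else (none, none, none)) := by
  simp only [pvNextNgram]
  rw [if_neg (by omega), PySem.List.pyRange_one_eq_nil (by omega), List.foldl_nil]
  show (if (1 : Int) = n + 1 then _ else if (1 : Int) = n then _ else _) = _
  rw [if_neg (show (1 : Int) ≠ n + 1 by omega)]
  by_cases h1 : (1 : Int) = n
  · rw [if_pos h1, if_pos h1.symm, if_pos h1.symm]
  · rw [if_neg h1, if_neg (fun hh => h1 hh.symm)]

lemma pvMain (temp sent : List Int) (slen : Int) (hle : slen ≤ (temp.length : Int))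
    (n : Int) (hn : 1 ≤ n) (d : PySem.Dict String (List String)) :
    pvLoopA temp sent n slen (slen.toNat + 1) 0 d =
      pvInnerB sent ((pvRunLen temp slen).1 ++ [slen]) (pvRunLen temp slen).2.1 n d := by
  by_cases hsgn : slen < 0
  · rw [pvRunLen_neg temp slen hsgn, show slen.toNat + 1 = 1 by omega]
    dsimp only
    simp only [pvLoopA]
    rw [pvNegNG temp sent slen n hsgn hn]
    by_cases h1 : n = 1
    · subst h1
      rw [if_pos rfl]
      have hT : PySem.List.slice [PySem.List.pyGetD temp 0 0] (some (0 : Int))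
          (some ((0 : Int) + 1)) = [PySem.List.pyGetD temp 0 0] := by
        rw [PySem.List.slice_toNat _ (by norm_num) (by norm_num)]
        norm_num
      have hS1 : PySem.List.pyGetD ([0] ++ [slen] : List Int) ((0 : Int) + 1) 0 = slen := by
        rw [show (0 : Int) + 1 = ((1 : Nat) : Int) by norm_num, PySem.List.pyGetD_natCast]
        rfl
      have hrhs : pvInnerB sent ([0] ++ [slen]) [PySem.List.pyGetD temp 0 0] 1 d =
          d.modify (PySem.Str.join "-" ([PySem.List.pyGetD temp 0 0].map PySem.Int.toStr)) []
            (· ++ [PySem.Str.join "-"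
              ((PySem.List.slice sent (some 0) (some slen)).map PySem.Int.toStr)]) := by
        simp only [pvInnerB]
        rw [show (([PySem.List.pyGetD temp 0 0] : List Int).length : Int) - 1 + 1 = 1 by
              norm_num,
            show PySem.List.pyRange 0 1 1 = [0] from by decide, List.foldl_cons, List.foldl_nil]
        simp only [pvStepB]
        rw [hT, hS1]
        rfl
      show (if d.contains (PySem.Str.join "-"
              ([PySem.List.pyGetD temp 0 0].map PySem.Int.toStr)) = false
            then d.insert (PySem.Str.join "-" ([PySem.List.pyGetD temp 0 0].map PySem.Int.toStr))
                  [PySem.Str.join "-"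
                    ((PySem.List.slice sent (some 0) (some slen)).map PySem.Int.toStr)]
            else d.modify (PySem.Str.join "-"
                  ([PySem.List.pyGetD temp 0 0].map PySem.Int.toStr)) []
                  (· ++ [PySem.Str.join "-"
                    ((PySem.List.slice sent (some 0) (some slen)).map PySem.Int.toStr)])) =
          pvInnerB sent ([0] ++ [slen]) [PySem.List.pyGetD temp 0 0] 1 d
      rw [pvStepDict, hrhs]
    · rw [if_neg h1]
      show d = pvInnerB sent ([0] ++ [slen]) [PySem.List.pyGetD temp 0 0] n d
      simp only [pvInnerB]
      rw [PySem.List.pyRange_one_eq_nil (by simp; omega), List.foldl_nil]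
  · have h0 : 0 ≤ slen := by omega
    have hm : slen = ((slen.toNat : Nat) : Int) := by omega
    rw [hm, Int.toNat_natCast]
    obtain ⟨hG, -⟩ := pvR temp slen.toNat (by omega)
    have hsent : ((pvRunLen temp ((slen.toNat : Nat) : Int)).1 ++ [((slen.toNat : Nat) : Int)]).getD
        (pvRunLen temp ((slen.toNat : Nat) : Int)).2.1.length 0 = ((slen.toNat : Nat) : Int) :=
      hG.2.2.2.1
    have h00 : ((pvRunLen temp ((slen.toNat : Nat) : Int)).1 ++
        [((slen.toNat : Nat) : Int)]).getD 0 0 = 0 := by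
      rcases Nat.eq_zero_or_pos (pvRunLen temp ((slen.toNat : Nat) : Int)).2.1.length with hz | hpos
      · have hz0 := hG.2.2.2.2.2.2 hz
        rw [hz] at hsent
        rw [hsent, hz0]
      · exact hG.2.2.1 hpos
    have hkle : ((pvRunLen temp ((slen.toNat : Nat) : Int)).2.1.length : Int) ≤
        ((slen.toNat : Nat) : Int) := by
      have := pvGood_le temp _ _ _ hG (pvRunLen temp ((slen.toNat : Nat) : Int)).2.1.length
        (by rw [hG.1]; omega)
      rw [hsent] at this
      exact this
    have hloop := pvLOOP temp sent
      ((pvRunLen temp ((slen.toNat : Nat) : Int)).1 ++ [((slen.toNat : Nat) : Int)])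
      (pvRunLen temp ((slen.toNat : Nat) : Int)).2.1 ((slen.toNat : Nat) : Int) hG n hn
      (slen.toNat + 1) 0 d (by omega) (by omega)
    rw [h00] at hloop
    rw [hloop]
    simp only [pvInnerB, Nat.cast_zero]

-- ===== VERDICT (by name: the statement is the Claim_ definition above) =====
theorem analyse_temp_py_spec : Claim_equal_analyse_temp_py := by
  intro temp sent slen _ hPre
  unfold Spec_analyse_temp_py
  have hle : slen ≤ (temp.length : Int) := hPre.1
  have formA : analyse_temp_py temp sent slen =
      [(1, (pvLoopA temp sent 1 slen (slen.toNat + 1) 0 PySem.Dict.empty).items),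
       (2, (pvLoopA temp sent 2 slen (slen.toNat + 1) 0 PySem.Dict.empty).items),
       (3, (pvLoopA temp sent 3 slen (slen.toNat + 1) 0 PySem.Dict.empty).items),
       (4, (pvLoopA temp sent 4 slen (slen.toNat + 1) 0 PySem.Dict.empty).items)] := rfl
  have formB : analyse_temp_py_alt temp sent slen =
      [(1, (pvInnerB sent ((pvRunLen temp slen).1 ++ [slen]) (pvRunLen temp slen).2.1 1 PySem.Dict.empty).items),
       (2, (pvInnerB sent ((pvRunLen temp slen).1 ++ [slen]) (pvRunLen temp slen).2.1 2 PySem.Dict.empty).items),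
       (3, (pvInnerB sent ((pvRunLen temp slen).1 ++ [slen]) (pvRunLen temp slen).2.1 3 PySem.Dict.empty).items),
       (4, (pvInnerB sent ((pvRunLen temp slen).1 ++ [slen]) (pvRunLen temp slen).2.1 4 PySem.Dict.empty).items)] := rfl
  rw [formA, formB, pvMain temp sent slen hle 1 (by norm_num),
      pvMain temp sent slen hle 2 (by norm_num),
      pvMain temp sent slen hle 3 (by norm_num),
      pvMain temp sent slen hle 4 (by norm_num)]
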